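-- pv_equiv track=rewrite | github.com/specbug/competitive-programming | AdventOfCode/2020/day6_2.py | yes_meter
-- ===== SOURCE A (Python) =====
-- def yes_meter(arr):
-- 	n = 0
-- 	for i in arr:
-- 		this_g = set()
-- 		first = True
-- 		for j in i.split('\n'):
-- 			if len(this_g)==0:
-- 				if first:
-- 					this_g = set([c for c in j.strip()])
-- 					first = False
-- 				else:
-- 					break
-- 			else:
-- 				this_g = this_g & set([c for c in j.strip()])
--
-- 		n += len(this_g)
-- 	return n
-- ===== SOURCE B (Python) =====
-- def yes_meter(arr):
-- 	n = 0
-- 	for group in arr: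
-- 		lines = group.split('\n')
-- 		counts = {}
-- 		for line in lines:
-- 			for c in set(line.strip()):
-- 				counts[c] = counts.get(c, 0) + 1
-- 		n += sum(1 for v in counts.values() if v == len(lines))
-- 	return n
-- ===== Notes on version B (the rewrite author's own statement) =====
-- stated objective: idiomatic
-- what changed: Replaces A's shrinking set-intersection accumulator with its first/break state machine by a per-group character-frequency table (Counter-style dict over each line's stripped char set) filtered at threshold = number of lines.
import Mathlib
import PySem

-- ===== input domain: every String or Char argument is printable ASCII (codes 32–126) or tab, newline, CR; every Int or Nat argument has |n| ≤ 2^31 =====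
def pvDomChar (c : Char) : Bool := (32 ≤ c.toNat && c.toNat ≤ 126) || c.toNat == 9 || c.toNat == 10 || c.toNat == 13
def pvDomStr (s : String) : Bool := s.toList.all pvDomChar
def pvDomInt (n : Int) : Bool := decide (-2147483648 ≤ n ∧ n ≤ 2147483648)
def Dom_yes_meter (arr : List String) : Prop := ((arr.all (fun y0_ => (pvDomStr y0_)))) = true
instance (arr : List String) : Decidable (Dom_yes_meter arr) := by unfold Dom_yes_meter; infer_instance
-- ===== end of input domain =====

-- B replaces A's shrinking-intersection accumulator (with its early break) by a per-group
-- character frequency table filtered at threshold = number of lines (objective: idiomatic).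

-- ===== PORT A =====
-- the inner 'for j in i.split('\n')' loop of A, with its state (this_g, first) and early break
def pvAInner : List (List Char) → PySem.Set Char → Bool → PySem.Set Char
  | [], g, _ => g
  | j :: rest, g, first =>
    if PySem.Set.len g = 0 then
      if first then pvAInner rest (PySem.Set.ofList (PySem.Chars.strip j)) false
      else g                                        -- 'break': leave the loop, this_g = g
    else pvAInner rest (PySem.Set.inter g (PySem.Set.ofList (PySem.Chars.strip j))) first

def yes_meter (arr : List String) : Int :=
  arr.foldl
    (fun n i =>
      n + PySem.Set.len (pvAInner (PySem.Chars.splitOn i.toList ['\n']) PySem.Set.empty true))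
    0

-- ===== PORT B =====
-- one group: build counts[c] = number of lines whose stripped char set contains c,
-- then count the values that equal the number of lines
def pvBCounts (lines : List (List Char)) : PySem.Dict Char Int :=
  lines.foldl
    (fun d line =>
      (PySem.Set.ofList (PySem.Chars.strip line)).foldl
        (fun d c => d.insert c (d.getD c 0 + 1)) d)
    PySem.Dict.empty

def pvBGroup (lines : List (List Char)) : Int :=
  (((pvBCounts lines).values.filter (fun v => v == (lines.length : Int))).length : Int)

def yes_meter_alt (arr : List String) : Int :=
  arr.foldl (fun n group => n + pvBGroup (PySem.Chars.splitOn group.toList ['\n'])) 0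

-- ===== PRECONDITION & SPEC =====
def Spec_yes_meter (arr : List String) (out : Int) : Prop := out = yes_meter_alt arr
instance (arr : List String) (out : Int) : Decidable (Spec_yes_meter arr out) := by unfold Spec_yes_meter; infer_instance

-- ===== CLAIM (what is proved, stated in full; the proofs are below) =====
def Claim_equal_yes_meter : Prop := ∀ (arr : List String), Dom_yes_meter arr → Spec_yes_meter arr (yes_meter arr)

-- ===== LEMMAS AND PROOFS =====

-- the stripped char set of one line
def pvS (j : List Char) : PySem.Set Char := PySem.Set.ofList (PySem.Chars.strip j)

-- A's loop after the first line is the filter of g by membership in every remaining line's set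
theorem pvAInner_false (rest : List (List Char)) : ∀ g : PySem.Set Char,
    pvAInner rest g false = g.filter (fun c => rest.all (fun j => (pvS j).contains c)) := by
  induction rest with
  | nil => intro g; simp [pvAInner]
  | cons j rest ih =>
    intro g
    by_cases hg : PySem.Set.len g = 0
    · have hg' : g = [] := by
        simpa [PySem.Set.len, List.length_eq_zero_iff] using hg
      simp [pvAInner, hg']
    · simp only [pvAInner, if_neg hg, ih, pvS, PySem.Set.inter, List.filter_filter,
        List.all_cons]
      congr 1
      funext c
      rw [Bool.and_comm]

-- count of c in the concatenation of the line sets = number of lines whose set contains c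
theorem pvCount_flatMap (L : List (List Char)) (c : Char) :
    (L.flatMap pvS).count c = L.countP (fun j => (pvS j).contains c) := by
  rw [List.count_flatMap]
  rw [← PySem.List.sum_map_ite_one_zero_nat (fun j => (pvS j).contains c) L]
  congr 1
  apply List.map_congr_left
  intro j _
  by_cases h : c ∈ pvS j
  · have : (pvS j).count c = 1 :=
      List.count_eq_one_of_mem (PySem.Set.nodup_ofList _) h
    simp [Function.comp, this, h]
  · have : (pvS j).count c = 0 := List.count_eq_zero.2 h
    simp [Function.comp, this, h]

-- the two per-group computations agree
theorem pvGroup_eq (L : List (List Char)) :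
    PySem.Set.len (pvAInner L PySem.Set.empty true) = pvBGroup L := by
  cases L with
  | nil => rfl
  | cons h rest =>
    -- A side
    have hA : pvAInner (h :: rest) PySem.Set.empty true
        = (pvS h).filter (fun c => rest.all (fun j => (pvS j).contains c)) := by
      simp only [pvAInner, PySem.Set.len, PySem.Set.empty, List.length_nil]
      exact pvAInner_false rest (pvS h)
    -- B side: the nested fold is Counter of the concatenated line sets
    set xs : List Char := (h :: rest).flatMap pvS with hxs
    have hcounts : pvBCounts (h :: rest) = PySem.Dict.counter xs := by
      rw [← PySem.Dict.foldl_insert_getD_add_one_eq_counter, hxs, List.foldl_flatMap]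
      rfl
    have hvalues : (PySem.Dict.counter xs).values
        = (PySem.Set.ofList xs).map (fun k => ((xs.count k : Int))) := by
      rw [PySem.Dict.values_eq_map_keys _ (PySem.Dict.nodup_keys_counter xs) 0]
      rw [PySem.Dict.keys_counter]
      apply List.map_congr_left
      intro k _
      exact PySem.Dict.getD_counter xs k
    -- both sides are lengths of nodup lists with the same membership
    have hperm :
        ((pvS h).filter (fun c => rest.all (fun j => (pvS j).contains c))).Perm
        ((PySem.Set.ofList xs).filter
          (fun k => ((xs.count k : Int) == ((h :: rest).length : Int)))) := by
      refine (List.perm_ext_iff_of_nodup ?_ ?_).2 ?_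
      · exact List.Nodup.filter _ (PySem.Set.nodup_ofList _)
      · exact List.Nodup.filter _ (PySem.Set.nodup_ofList _)
      intro c
      simp only [List.mem_filter, PySem.Set.mem_ofList, beq_iff_eq, Int.natCast_inj]
      constructor
      · rintro ⟨hc, hall⟩
        have hallL : ∀ j ∈ h :: rest, (pvS j).contains c = true := by
          intro j hj
          rcases List.mem_cons.1 hj with rfl | hj
          · exact (PySem.Set.contains_iff _ _).2 hc
          · exact (List.all_eq_true.1 hall) j hj
        refine ⟨List.mem_flatMap.2 ⟨h, List.mem_cons_self, hc⟩, ?_⟩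
        rw [pvCount_flatMap]
        exact List.countP_eq_length.2 hallL
      · rintro ⟨_, hcnt⟩
        rw [pvCount_flatMap] at hcnt
        have hallL := List.countP_eq_length.1 hcnt
        have hc : c ∈ pvS h :=
          (PySem.Set.contains_iff _ _).1 (hallL h List.mem_cons_self)
        refine ⟨hc, List.all_eq_true.2 ?_⟩
        intro j hj
        exact hallL j (List.mem_cons_of_mem _ hj)
    -- assemble
    show PySem.Set.len (pvAInner (h :: rest) PySem.Set.empty true) = pvBGroup (h :: rest)
    rw [hA]
    unfold pvBGroup
    rw [hcounts, hvalues]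

    simp only [PySem.Set.len, List.filter_map, List.length_map]
    exact_mod_cast hperm.length_eq

-- ===== VERDICT (by name: the statement is the Claim_ definition above) =====
theorem yes_meter_spec : Claim_equal_yes_meter := by
  intro arr _
  unfold Spec_yes_meter yes_meter yes_meter_alt
  congr 1
  funext n i
  rw [pvGroup_eq]
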